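-- pv_equiv track=rewrite | github.com/PreciousWarrior/random-stuff | youtube-code/binary_wording.py | get_binary_wording_count
-- ===== SOURCE A (Python) =====
-- def get_binary_wording_count(n):
--     bin_str = "{0:b}".format(n)
--     counter = 0
--     for char in bin_str:
--         if char == "0":
--             counter += len("ZERO")
--         if char == "1":
--             counter += len("ONE")
--     return counter
-- ===== SOURCE B (Python) =====
-- def get_binary_wording_count(n):
--     if n == 0:
--         return 4
--     m = abs(n)
--     return 4 * m.bit_length() - m.bit_count()
-- ===== Notes on version B (the rewrite author's own statement) =====
-- stated objective: simpler
-- what changed: Replaces the loop over the binary string by a closed form: each digit contributes 4 (zero) or 3 (one), so the result is 4*bit_length - bit_count of |n|, with n==0 giving 4 for the single '0' digit.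
import Mathlib
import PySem

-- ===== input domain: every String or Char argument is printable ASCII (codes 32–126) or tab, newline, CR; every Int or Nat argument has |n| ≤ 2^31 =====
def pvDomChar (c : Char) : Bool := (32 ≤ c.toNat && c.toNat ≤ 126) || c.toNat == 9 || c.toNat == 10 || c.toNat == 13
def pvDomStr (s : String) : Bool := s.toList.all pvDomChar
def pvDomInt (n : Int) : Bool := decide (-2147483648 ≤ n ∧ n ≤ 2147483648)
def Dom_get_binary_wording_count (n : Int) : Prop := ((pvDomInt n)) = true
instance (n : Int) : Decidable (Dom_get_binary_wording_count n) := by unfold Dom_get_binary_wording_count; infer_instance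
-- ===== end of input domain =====

-- B replaces the digit loop by the closed form 4*bit_length(|n|) - bit_count(|n|) (n==0 ↦ 4): simpler.

-- ===== PORT A =====
-- "{0:b}".format n: '-' sign for negative n, then the binary digits of |n| ('0' if n == 0)
def pvBinChars (m : Nat) : List Char :=
  if m = 0 then [] else pvBinChars (m / 2) ++ [if m % 2 = 1 then '1' else '0']
decreasing_by exact Nat.div_lt_self (Nat.pos_of_ne_zero (by assumption)) (by norm_num)

def get_binary_wording_count (n : Int) : Int :=
  let bin_str : List Char :=
    (if n < 0 then ['-'] else []) ++ (if n = 0 then ['0'] else pvBinChars n.natAbs)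
  bin_str.foldl (fun counter ch =>
    (counter + (if ch = '0' then (4 : Int) else 0)) + (if ch = '1' then (3 : Int) else 0)) 0

-- ===== PORT B =====
def pvBitLen (m : Nat) : Nat :=
  if m = 0 then 0 else pvBitLen (m / 2) + 1
decreasing_by exact Nat.div_lt_self (Nat.pos_of_ne_zero (by assumption)) (by norm_num)

def pvBitCount (m : Nat) : Nat :=
  if m = 0 then 0 else pvBitCount (m / 2) + m % 2
decreasing_by exact Nat.div_lt_self (Nat.pos_of_ne_zero (by assumption)) (by norm_num)

def get_binary_wording_count_alt (n : Int) : Int :=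
  if n = 0 then 4 else 4 * (pvBitLen n.natAbs : Int) - (pvBitCount n.natAbs : Int)

-- ===== PRECONDITION & SPEC =====
def Spec_get_binary_wording_count (n : Int) (out : Int) : Prop := out = get_binary_wording_count_alt n
instance (n : Int) (out : Int) : Decidable (Spec_get_binary_wording_count n out) := by unfold Spec_get_binary_wording_count; infer_instance

-- ===== CLAIM (what is proved, stated in full; the proofs are below) =====
def Claim_equal_get_binary_wording_count : Prop := ∀ (n : Int), Dom_get_binary_wording_count n → Spec_get_binary_wording_count n (get_binary_wording_count n)

-- ===== LEMMAS AND PROOFS =====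
theorem pvFoldl_bin (m : Nat) : ∀ (c : Int),
    (pvBinChars m).foldl (fun counter ch =>
      (counter + (if ch = '0' then (4 : Int) else 0)) + (if ch = '1' then (3 : Int) else 0)) c
    = c + 4 * (pvBitLen m : Int) - (pvBitCount m : Int) := by
  induction m using Nat.strong_induction_on with
  | _ m ih =>
    intro c
    by_cases h : m = 0
    · simp [pvBinChars, pvBitLen, pvBitCount, h]
    · have hlt : m / 2 < m := Nat.div_lt_self (Nat.pos_of_ne_zero h) (by norm_num)
      rw [pvBinChars, pvBitLen, pvBitCount]
      simp only [h, ite_false]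
      rw [List.foldl_append, ih (m / 2) hlt c]
      have hm2 : m % 2 = 0 ∨ m % 2 = 1 := Nat.mod_two_eq_zero_or_one m
      rcases hm2 with h2 | h2 <;> simp [h2] <;> ring

-- ===== VERDICT (by name: the statement is the Claim_ definition above) =====
theorem get_binary_wording_count_spec : Claim_equal_get_binary_wording_count := by
  intro n _
  unfold Spec_get_binary_wording_count get_binary_wording_count get_binary_wording_count_alt
  by_cases h0 : n = 0
  · simp [h0]
  · by_cases hneg : n < 0 <;> simp [h0, hneg, pvFoldl_bin]
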